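-- pv_equiv track=rewrite | github.com/ssiq/GrammaLanguageModel | model/sequence_production_based_lm.py | _stack_batch
-- ===== SOURCE A (Python) =====
-- def _stack_batch(batch):
--     res = []
--     for i in range(len(batch[0])):
--         r = []
--         for b in batch:
--             if i >= len(b):
--                 break
--             r.append(b[i])
--         res.append(r)
--     return res
-- ===== SOURCE B (Python) =====
-- def _stack_batch(batch):
--     res = [[] for _ in range(len(batch[0]))]
--     m = len(batch[0])
--     for b in batch:
--         m = min(m, len(b))
--         for i in range(m):
--             res[i].append(b[i])
--     return res
-- ===== Notes on version B (the rewrite author's own statement) =====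
-- stated objective: alternative
-- what changed: Column-major double loop with an inner break is replaced by a single row-major pass over the batches that keeps a running minimum length and appends into pre-built column lists.
import Mathlib
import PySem

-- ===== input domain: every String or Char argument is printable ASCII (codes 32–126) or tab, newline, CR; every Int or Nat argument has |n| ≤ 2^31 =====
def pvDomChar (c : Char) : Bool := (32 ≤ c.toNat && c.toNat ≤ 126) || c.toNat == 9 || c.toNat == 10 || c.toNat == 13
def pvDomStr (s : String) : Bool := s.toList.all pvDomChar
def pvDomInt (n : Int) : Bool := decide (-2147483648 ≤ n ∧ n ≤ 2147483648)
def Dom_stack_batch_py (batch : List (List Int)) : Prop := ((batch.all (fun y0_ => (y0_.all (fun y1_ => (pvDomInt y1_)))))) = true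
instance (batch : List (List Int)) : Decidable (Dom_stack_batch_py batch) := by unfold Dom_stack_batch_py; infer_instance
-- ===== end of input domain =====

-- B replaces A's column-major loops (inner break at the first short batch) by one row-major
-- pass with a running minimum length; same cost, different decomposition (objective: alternative).

-- ===== PORT A =====
-- inner loop: r = []; for b in rest: if i >= len(b): break; r.append(b[i])
def stackACol (rest : List (List Int)) (i : Nat) : List Int :=
  match rest with
  | [] => []
  | b :: bs => if i < b.length then b.getD i 0 :: stackACol bs i else []

def stack_batch_py (batch : List (List Int)) : List (List Int) :=
  -- res = []; for i in range(len(batch[0])): res.append(r)   (batch[0] exists by Pre_)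
  (List.range (batch.headD []).length).foldl (fun res i => res ++ [stackACol batch i]) []

-- ===== PORT B =====
-- for i in range(m): res[i].append(b[i])
def stackBStep (res : List (List Int)) (b : List Int) (m : Nat) : List (List Int) :=
  res.mapIdx (fun i col => if i < m then col ++ [b.getD i 0] else col)

def stack_batch_py_alt (batch : List (List Int)) : List (List Int) :=
  let n := (batch.headD []).length
  (batch.foldl (fun (st : List (List Int) × Nat) b =>
      let m := min st.2 b.length
      (stackBStep st.1 b m, m)) (List.replicate n [], n)).1

-- ===== PRECONDITION & SPEC =====
-- A evaluates batch[0]: on the empty list both A and B raise IndexError, so it is excluded.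
def Pre_stack_batch_py (batch : List (List Int)) : Prop := batch ≠ []
instance (batch : List (List Int)) : Decidable (Pre_stack_batch_py batch) := by unfold Pre_stack_batch_py; infer_instance
def pvWitness_stack_batch_py : List (List Int) := [[1, 2, 3], [4, 5], [6, 7, 8]]

def Spec_stack_batch_py (batch : List (List Int)) (out : List (List Int)) : Prop := out = stack_batch_py_alt batch
instance (batch : List (List Int)) (out : List (List Int)) : Decidable (Spec_stack_batch_py batch out) := by unfold Spec_stack_batch_py; infer_instance

-- ===== CLAIM (what is proved, stated in full; the proofs are below) =====
def Claim_equal_stack_batch_py : Prop := ∀ (batch : List (List Int)), Dom_stack_batch_py batch → Pre_stack_batch_py batch → Spec_stack_batch_py batch (stack_batch_py batch)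

-- ===== LEMMAS AND PROOFS =====

-- A's outer foldl is a map over the column indices
theorem foldl_append_singleton {α β : Type} (f : α → β) (l : List α) (acc : List β) :
    l.foldl (fun res i => res ++ [f i]) acc = acc ++ l.map f := by
  induction l generalizing acc with
  | nil => simp
  | cons x xs ih => simp [List.foldl, ih]

-- the capped column: what B appends to column i while folding p with running min m
def colCap (p : List (List Int)) (i m : Nat) : List Int :=
  match p with
  | [] => []
  | b :: bs =>
      let m' := min m b.length
      if i < m' then b.getD i 0 :: colCap bs i m' else colCap bs i m'

theorem colCap_nil (p : List (List Int)) (i m : Nat) (h : m ≤ i) : colCap p i m = [] := by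
  induction p generalizing m with
  | nil => rfl
  | cons b bs ih =>
      simp only [colCap]
      rw [if_neg (by omega), ih _ (le_trans (min_le_left _ _) h)]

theorem colCap_eq_stackACol (p : List (List Int)) (i m : Nat) (h : i < m) :
    colCap p i m = stackACol p i := by
  induction p generalizing m with
  | nil => rfl
  | cons b bs ih =>
      simp only [colCap, stackACol]
      by_cases hb : i < b.length
      · rw [if_pos (by omega), if_pos hb, ih _ (by omega)]
      · rw [if_neg (by omega), if_neg hb, colCap_nil bs i _ (by omega)]

-- loop invariant for B's fold
theorem stackB_inv (p : List (List Int)) (res : List (List Int)) (m : Nat) :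
    (p.foldl (fun st b => let m' := min st.2 b.length; (stackBStep st.1 b m', m'))
        (res, m)).1
      = res.mapIdx (fun i col => col ++ colCap p i m) := by
  induction p generalizing res m with
  | nil =>
      simp only [List.foldl, colCap]
      apply List.ext_getElem <;> simp
  | cons b bs ih =>
      simp only [List.foldl]
      rw [ih]
      apply List.ext_getElem
      · simp [stackBStep]
      · intro j h1 h2
        simp only [stackBStep, List.getElem_mapIdx, colCap]
        by_cases hj : j < min m b.length
        · rw [if_pos hj, if_pos hj, List.append_assoc]; rfl
        · rw [if_neg hj, if_neg hj]

theorem mapIdx_replicate_nil {β : Type} (n : Nat) (f : Nat → List β) :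
    (List.replicate n ([] : List β)).mapIdx (fun i col => col ++ f i) = (List.range n).map f := by
  apply List.ext_getElem
  · simp
  · intro j h1 h2
    simp

-- ===== VERDICT (by name: the statement is the Claim_ definition above) =====
theorem stack_batch_py_spec : Claim_equal_stack_batch_py := by
  intro batch _ _
  unfold Spec_stack_batch_py stack_batch_py stack_batch_py_alt
  rw [stackB_inv, mapIdx_replicate_nil, foldl_append_singleton]
  simp only [List.nil_append]
  apply List.map_congr_left
  intro i hi
  exact (colCap_eq_stackACol batch i _ (List.mem_range.mp hi)).symm
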